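-- pv_equiv track=rewrite | github.com/losek1996/advent-of-code | solutions_2025/day4/day4_solution.py | count_rolls_of_papers_around
-- ===== SOURCE A (Python) =====
-- from typing import TypeAlias
--
-- GridRow: TypeAlias = list[str]
--
-- ROLL_OF_PAPER = "@"
--
-- def count_rolls_of_papers_around(
--     position: int,
--     current_row: GridRow,
--     previous_row: GridRow | None,
--     next_row: GridRow | None,
-- ) -> int:
--     counter = 0
--     neighbours = [
--         (previous_row, -1),
--         (previous_row, 0),
--         (previous_row, 1),
--         (current_row, -1),
--         (current_row, 1),
--         (next_row, -1),
--         (next_row, 0),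
--         (next_row, 1),
--     ]
--
--     for neighbour_row, neighbour_row_offset in neighbours:
--         if neighbour_row is None:
--             continue
--         neighbour_position = position + neighbour_row_offset
--         if (
--             0 <= neighbour_position < len(neighbour_row)
--             and neighbour_row[neighbour_position] == ROLL_OF_PAPER
--         ):
--             counter += 1
--
--     return counter
-- ===== SOURCE B (Python) =====
-- ROLL_OF_PAPER = "@"
--
--
-- def count_rolls_of_papers_around(position, current_row, previous_row, next_row):
--     def window(row, lo, hi):
--         if row is None:
--             return 0
--         return row[max(0, lo):max(0, hi)].count(ROLL_OF_PAPER)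
--
--     return (
--         window(previous_row, position - 1, position + 2)
--         + window(current_row, position - 1, position)
--         + window(current_row, position + 1, position + 2)
--         + window(next_row, position - 1, position + 2)
--     )
-- ===== Notes on version B (the rewrite author's own statement) =====
-- stated objective: simpler
-- what changed: Replaces the explicit list of 8 (row, offset) pairs and the per-cell bounds-checked loop with clamped window slices and .count: a 3-wide window on the previous and next rows and two 1-wide side windows on the current row.
import Mathlib
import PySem

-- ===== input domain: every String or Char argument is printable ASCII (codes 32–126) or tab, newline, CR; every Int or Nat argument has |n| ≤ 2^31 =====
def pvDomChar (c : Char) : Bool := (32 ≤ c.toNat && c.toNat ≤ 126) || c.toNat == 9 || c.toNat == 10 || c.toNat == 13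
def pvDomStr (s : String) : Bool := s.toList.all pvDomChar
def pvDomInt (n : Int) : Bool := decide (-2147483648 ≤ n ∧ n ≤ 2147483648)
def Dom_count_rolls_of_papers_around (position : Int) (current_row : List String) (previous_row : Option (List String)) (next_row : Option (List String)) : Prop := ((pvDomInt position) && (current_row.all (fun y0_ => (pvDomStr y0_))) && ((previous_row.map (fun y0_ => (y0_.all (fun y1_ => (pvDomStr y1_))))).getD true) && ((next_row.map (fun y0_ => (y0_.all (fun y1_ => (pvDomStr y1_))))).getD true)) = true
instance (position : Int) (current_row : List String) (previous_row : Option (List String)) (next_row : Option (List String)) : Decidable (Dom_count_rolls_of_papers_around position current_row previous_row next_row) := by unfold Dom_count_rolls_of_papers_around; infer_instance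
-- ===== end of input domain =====

-- ===== PORT A =====
-- B replaces the 8-pair loop of A by clamped window slices and .count (objective: simpler); return value only, no mutation.
def count_rolls_of_papers_around (position : Int) (current_row : List String) (previous_row : Option (List String)) (next_row : Option (List String)) : Int :=
  let neighbours : List (Option (List String) × Int) :=
    [(previous_row, -1), (previous_row, 0), (previous_row, 1),
     (some current_row, -1), (some current_row, 1),
     (next_row, -1), (next_row, 0), (next_row, 1)]
  neighbours.foldl (fun counter nb =>
    match nb.1 with
    | none => counter
    | some row =>
      let neighbour_position := position + nb.2
      if 0 ≤ neighbour_position ∧ neighbour_position < (row.length : Int) ∧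
          PySem.List.pyGet? row neighbour_position = some "@"
      then counter + 1 else counter) 0

-- ===== PORT B =====
-- window(row, lo, hi) from Source B: 0 for None, else row[max(0,lo):max(0,hi)].count("@")
def pvWindow (row? : Option (List String)) (lo hi : Int) : Int :=
  match row? with
  | none => 0
  | some row => ((PySem.List.slice row (some (max 0 lo)) (some (max 0 hi))).count "@" : Int)

def count_rolls_of_papers_around_alt (position : Int) (current_row : List String) (previous_row : Option (List String)) (next_row : Option (List String)) : Int :=
  pvWindow previous_row (position - 1) (position + 2)
  + pvWindow (some current_row) (position - 1) position
  + pvWindow (some current_row) (position + 1) (position + 2)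
  + pvWindow next_row (position - 1) (position + 2)

-- ===== PRECONDITION & SPEC =====
def Spec_count_rolls_of_papers_around (position : Int) (current_row : List String) (previous_row : Option (List String)) (next_row : Option (List String)) (out : Int) : Prop := out = count_rolls_of_papers_around_alt position current_row previous_row next_row
instance (position : Int) (current_row : List String) (previous_row : Option (List String)) (next_row : Option (List String)) (out : Int) : Decidable (Spec_count_rolls_of_papers_around position current_row previous_row next_row out) := by unfold Spec_count_rolls_of_papers_around; infer_instance

-- ===== CLAIM (what is proved, stated in full; the proofs are below) =====
def Claim_equal_count_rolls_of_papers_around : Prop := ∀ (position : Int) (current_row : List String) (previous_row : Option (List String)) (next_row : Option (List String)), Dom_count_rolls_of_papers_around position current_row previous_row next_row → Spec_count_rolls_of_papers_around position current_row previous_row next_row (count_rolls_of_papers_around position current_row previous_row next_row)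

-- ===== LEMMAS AND PROOFS =====

theorem pv_if_add_one (c : Prop) [Decidable c] (x : Int) :
    (if c then x + 1 else x) = x + (if c then 1 else 0) := by
  split <;> ring

-- A-side indicator for one neighbour cell
def pvInd (xs : List String) (q : Int) : Int :=
  if 0 ≤ q ∧ q < (xs.length : Int) ∧ PySem.List.pyGet? xs q = some "@" then 1 else 0

theorem pvInd_neg (xs : List String) (q : Int) (h : q < 0) : pvInd xs q = 0 := by
  unfold pvInd
  rw [if_neg]
  rintro ⟨h0, -, -⟩; omega

theorem pvInd_nonneg_eq (xs : List String) (q : Int) (h : 0 ≤ q) :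
    pvInd xs q = (if xs[q.toNat]? = some "@" then 1 else 0) := by
  unfold pvInd
  rw [PySem.List.pyGet?_of_nonneg xs h]
  by_cases hlt : q < (xs.length : Int)
  · simp [h, hlt]
  · rw [if_neg (by tauto), if_neg]
    intro hget
    obtain ⟨hlen, -⟩ := List.getElem?_eq_some_iff.mp hget
    omega

theorem pv_cnt_take_succ (xs : List String) (a w : Nat) :
    ((((xs.drop a).take (w + 1)).count "@" : Nat) : Int)
      = (if xs[a]? = some "@" then 1 else 0)
        + ((((xs.drop (a + 1)).take w).count "@" : Nat) : Int) := by
  rcases Nat.lt_or_ge a xs.length with h | h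
  · rw [List.drop_eq_getElem_cons h, List.take_succ_cons, List.getElem?_eq_getElem h]
    by_cases he : xs[a] = "@"
    · rw [he, List.count_cons_self, if_pos rfl]
      push_cast; ring
    · rw [List.count_cons_of_ne he, if_neg (by simpa using he)]
      ring
  · rw [List.drop_eq_nil_iff.mpr h, List.drop_eq_nil_iff.mpr (by omega),
      List.getElem?_eq_none h]
    simp

theorem pv_cnt_one (xs : List String) (a : Nat) :
    ((((xs.drop a).take 1).count "@" : Nat) : Int)
      = (if xs[a]? = some "@" then 1 else 0) := by
  rw [pv_cnt_take_succ]
  simp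

theorem pv_cnt_two (xs : List String) (a : Nat) :
    ((((xs.drop a).take 2).count "@" : Nat) : Int)
      = (if xs[a]? = some "@" then 1 else 0) + (if xs[a + 1]? = some "@" then 1 else 0) := by
  rw [pv_cnt_take_succ, pv_cnt_one]

theorem pv_cnt_three (xs : List String) (a : Nat) :
    ((((xs.drop a).take 3).count "@" : Nat) : Int)
      = (if xs[a]? = some "@" then 1 else 0) + (if xs[a + 1]? = some "@" then 1 else 0)
        + (if xs[a + 2]? = some "@" then 1 else 0) := by
  rw [pv_cnt_take_succ, pv_cnt_two]
  have e : a + 1 + 1 = a + 2 := rfl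
  rw [e]; ring

-- the 3-wide window on a full row equals A's three cell indicators
theorem pv_win3 (xs : List String) (p : Int) :
    pvWindow (some xs) (p - 1) (p + 2)
      = pvInd xs (p - 1) + pvInd xs p + pvInd xs (p + 1) := by
  simp only [pvWindow]
  rw [PySem.List.slice_toNat xs (le_max_left _ _) (le_max_left _ _)]
  rcases lt_trichotomy p 0 with hp | hp | hp
  · rcases lt_or_ge p (-1) with hp2 | hp2
    · have h2 : (max 0 (p + 2)).toNat - (max 0 (p - 1)).toNat = 0 := by omega
      rw [h2, pvInd_neg xs _ (by omega), pvInd_neg xs _ (by omega),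
        pvInd_neg xs _ (by omega)]
      simp
    · have hp1 : p = -1 := by omega
      subst hp1
      have h1 : (max 0 (-1 - 1 : Int)).toNat = 0 := by decide
      have h2 : (max 0 (-1 + 2 : Int)).toNat - (max 0 (-1 - 1 : Int)).toNat = 1 := by decide
      rw [h2, h1, pvInd_neg xs _ (by omega), pvInd_neg xs _ (by omega),
        pvInd_nonneg_eq xs _ (by omega), pv_cnt_one]
      norm_num
  · subst hp
    have h1 : (max 0 (0 - 1 : Int)).toNat = 0 := by decide
    have h2 : (max 0 (0 + 2 : Int)).toNat - (max 0 (0 - 1 : Int)).toNat = 2 := by decide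
    rw [h2, h1, pvInd_neg xs _ (by omega), pvInd_nonneg_eq xs _ (by omega),
      pvInd_nonneg_eq xs _ (by omega), pv_cnt_two]
    norm_num
  · have h1 : (max 0 (p - 1)).toNat = (p - 1).toNat := by omega
    have h2 : (max 0 (p + 2)).toNat - (max 0 (p - 1)).toNat = 3 := by omega
    rw [h2, h1, pv_cnt_three, pvInd_nonneg_eq xs _ (by omega),
      pvInd_nonneg_eq xs _ (by omega), pvInd_nonneg_eq xs _ (by omega)]
    have e1 : (p - 1).toNat + 1 = p.toNat := by omega
    have e2 : (p - 1).toNat + 2 = (p + 1).toNat := by omega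
    rw [e1, e2]

-- a 1-wide window equals one cell indicator
theorem pv_win1 (xs : List String) (q : Int) :
    pvWindow (some xs) q (q + 1) = pvInd xs q := by
  simp only [pvWindow]
  rw [PySem.List.slice_toNat xs (le_max_left _ _) (le_max_left _ _)]
  rcases lt_or_ge q 0 with hq | hq
  · have h2 : (max 0 (q + 1)).toNat - (max 0 q).toNat = 0 := by omega
    rw [h2, pvInd_neg xs _ hq]
    simp
  · have h1 : (max 0 q).toNat = q.toNat := by omega
    have h2 : (max 0 (q + 1)).toNat - (max 0 q).toNat = 1 := by omega
    rw [h2, h1, pv_cnt_one, pvInd_nonneg_eq xs _ hq]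

theorem pv_win1_left (xs : List String) (p : Int) :
    pvWindow (some xs) (p - 1) p = pvInd xs (p - 1) := by
  have h := pv_win1 xs (p - 1)
  rw [show p - 1 + 1 = p from by ring] at h
  exact h

theorem pv_win1_right (xs : List String) (p : Int) :
    pvWindow (some xs) (p + 1) (p + 2) = pvInd xs (p + 1) := by
  have h := pv_win1 xs (p + 1)
  rw [show p + 1 + 1 = p + 2 from by ring] at h
  exact h

theorem pv_A_eq (position : Int) (current_row : List String)
    (previous_row next_row : Option (List String)) :
    count_rolls_of_papers_around position current_row previous_row next_row
      = count_rolls_of_papers_around_alt position current_row previous_row next_row := by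
  cases previous_row <;> cases next_row <;>
  · simp only [count_rolls_of_papers_around, count_rolls_of_papers_around_alt,
      List.foldl, pv_if_add_one]
    rw [show position + -1 = position - 1 from by ring]
    try rw [add_zero]
    try rw [pv_win3]
    try rw [pv_win3]
    rw [pv_win1_left, pv_win1_right]
    try simp only [pvWindow]
    unfold pvInd
    ring

-- ===== VERDICT (by name: the statement is the Claim_ definition above) =====
theorem count_rolls_of_papers_around_spec : Claim_equal_count_rolls_of_papers_around := by
  intro position current_row previous_row next_row _
  unfold Spec_count_rolls_of_papers_around
  exact pv_A_eq position current_row previous_row next_row
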